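-- pv_equiv track=rewrite | github.com/davidwolverton/Splunk_to_Elastic_Security_LLM_Detection_Converter | Python Scripts/SplunkDetectionLogicConverter-OpenAI.py | fix_problematic_bytes
-- ===== SOURCE A (Python) =====
-- def fix_problematic_bytes(byte_string):
--     fixed_string = ""
--     for byte in byte_string:
--         try:
--             # Try to decode each byte as UTF-8, otherwise replace with '?'
--             fixed_string += byte.to_bytes(1, 'big').decode('utf-8', errors='replace')
--         except UnicodeDecodeError:
--             # Replace any problematic byte with '?'
--             fixed_string += '?'
--     return fixed_string
-- ===== SOURCE B (Python) =====
-- def fix_problematic_bytes(byte_string):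
--     # ASCII is a single-byte codec: bytes < 128 decode to their char,
--     # each byte >= 128 is an independent invalid sequence replaced by U+FFFD,
--     # exactly matching the per-byte UTF-8 decode of A.
--     return bytes(byte_string).decode('ascii', errors='replace')
-- ===== Notes on version B (the rewrite author's own statement) =====
-- stated objective: idiomatic
-- what changed: Replaces the per-byte loop of to_bytes(1).decode('utf-8', errors='replace') with a single whole-list bytes(...).decode('ascii', errors='replace') call; equivalent because ASCII is a single-byte codec so each byte >= 128 becomes one U+FFFD.
import Mathlib
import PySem

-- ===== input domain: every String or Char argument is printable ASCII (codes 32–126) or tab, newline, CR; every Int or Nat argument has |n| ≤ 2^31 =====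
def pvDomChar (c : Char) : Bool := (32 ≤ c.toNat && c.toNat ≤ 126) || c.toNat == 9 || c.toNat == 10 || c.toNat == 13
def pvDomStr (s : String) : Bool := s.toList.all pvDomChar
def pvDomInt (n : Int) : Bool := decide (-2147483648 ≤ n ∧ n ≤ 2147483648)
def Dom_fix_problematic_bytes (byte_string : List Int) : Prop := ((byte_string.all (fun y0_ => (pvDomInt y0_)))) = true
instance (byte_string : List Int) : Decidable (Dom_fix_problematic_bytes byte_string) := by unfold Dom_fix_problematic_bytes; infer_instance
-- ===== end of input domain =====

-- B replaces A's per-byte decode-and-concatenate loop with one whole-string ASCII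
-- decode with replacement (idiomatic); return value only, no mutation either side.

-- ===== PORT A =====
-- A: fixed_string = ""; for each byte, byte.to_bytes(1,'big').decode('utf-8','replace')
-- is appended.  Single-byte UTF-8 decoding is modelled by this exact literal table of
-- the 128 one-byte UTF-8 sequences; a byte in 128..255 is an invalid sequence and
-- decodes to one U+FFFD.  Strings are modelled as List Char.
def utf8OneByteTable : List Char := ['\x00', '\x01', '\x02', '\x03', '\x04', '\x05', '\x06', '\x07', '\x08', '\x09', '\x0a', '\x0b', '\x0c', '\x0d', '\x0e', '\x0f', '\x10', '\x11', '\x12', '\x13', '\x14', '\x15', '\x16', '\x17', '\x18', '\x19', '\x1a', '\x1b', '\x1c', '\x1d', '\x1e', '\x1f', ' ', '!', '"', '#', '$', '%', '&', '\'', '(', ')', '*', '+', ',', '-', '.', '/', '0', '1', '2', '3', '4', '5', '6', '7', '8', '9', ':', ';', '<', '=', '>', '?', '@', 'A', 'B', 'C', 'D', 'E', 'F', 'G', 'H', 'I', 'J', 'K', 'L', 'M', 'N', 'O', 'P', 'Q', 'R', 'S', 'T', 'U', 'V', 'W', 'X', 'Y', 'Z', '[', '\\', ']', '^', '_', '`',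 'a', 'b', 'c', 'd', 'e', 'f', 'g', 'h', 'i', 'j', 'k', 'l', 'm', 'n', 'o', 'p', 'q', 'r', 's', 't', 'u', 'v', 'w', 'x', 'y', 'z', '{', '|', '}', '~', '\x7f']

def decodeByteUtf8Replace (byte : Int) : List Char :=
  if byte < 128 then [utf8OneByteTable.getD byte.toNat '\uFFFD'] else ['\uFFFD']

def fix_problematic_bytes (byte_string : List Int) : String :=
  String.ofList (byte_string.foldl
    (fun fixed_string byte => fixed_string ++ decodeByteUtf8Replace byte) [])

-- ===== PORT B =====
-- B: bytes(byte_string).decode('ascii', errors='replace') — the ASCII decoder scans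
-- the whole byte string once, emitting the code-point of each byte below 128 and
-- U+FFFD for each byte at or above 128 (structural recursion over the list).
def asciiDecodeReplace : List Int → List Char
  | [] => []
  | b :: rest =>
      (if b ≤ 127 then Char.ofNat b.toNat else '\uFFFD') :: asciiDecodeReplace rest

def fix_problematic_bytes_alt (byte_string : List Int) : String :=
  String.ofList (asciiDecodeReplace byte_string)

-- ===== PRECONDITION & SPEC =====
-- Pre_ excludes exactly the inputs where A raises: int.to_bytes(1,'big') raises
-- OverflowError (uncaught) for any element outside 0..255; B raises there too (ValueError).
def Pre_fix_problematic_bytes (byte_string : List Int) : Prop :=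
  ∀ b ∈ byte_string, 0 ≤ b ∧ b < 256
instance (byte_string : List Int) : Decidable (Pre_fix_problematic_bytes byte_string) := by
  unfold Pre_fix_problematic_bytes; infer_instance

def pvWitness_fix_problematic_bytes : List Int := [72, 105, 200, 0, 255]

def Spec_fix_problematic_bytes (byte_string : List Int) (out : String) : Prop := out = fix_problematic_bytes_alt byte_string
instance (byte_string : List Int) (out : String) : Decidable (Spec_fix_problematic_bytes byte_string out) := by unfold Spec_fix_problematic_bytes; infer_instance

-- ===== CLAIM (what is proved, stated in full; the proofs are below) =====
def Claim_equal_fix_problematic_bytes : Prop := ∀ (byte_string : List Int), Dom_fix_problematic_bytes byte_string → Pre_fix_problematic_bytes byte_string → Spec_fix_problematic_bytes byte_string (fix_problematic_bytes byte_string)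

-- ===== LEMMAS AND PROOFS =====
theorem foldl_append_singleton (f : Int → List Char) :
    ∀ (l : List Int) (acc : List Char),
      l.foldl (fun a b => a ++ f b) acc = acc ++ l.flatMap f := by
  intro l
  induction l with
  | nil => intro acc; simp
  | cons x xs ih => intro acc; simp [List.foldl, ih, List.flatMap_cons]

theorem table_getD_eq_ofNat : ∀ n < 128, utf8OneByteTable.getD n '\uFFFD' = Char.ofNat n := by
  decide

theorem decodeByte_eq (b : Int) (hb : 0 ≤ b) :
    decodeByteUtf8Replace b = [if b ≤ 127 then Char.ofNat b.toNat else '\uFFFD'] := by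
  unfold decodeByteUtf8Replace
  by_cases h : b < 128
  · rw [if_pos h, if_pos (by omega), table_getD_eq_ofNat b.toNat (by omega)]
  · rw [if_neg h, if_neg (by omega)]

theorem flatMap_decode_eq (l : List Int) (hl : ∀ b ∈ l, 0 ≤ b ∧ b < 256) :
    l.flatMap decodeByteUtf8Replace = asciiDecodeReplace l := by
  induction l with
  | nil => rfl
  | cons x xs ih =>
      rw [List.flatMap_cons, decodeByte_eq x (hl x (by simp)).1, asciiDecodeReplace,
        ih (fun b hb => hl b (by simp [hb]))]
      rfl

-- ===== VERDICT (by name: the statement is the Claim_ definition above) =====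
theorem fix_problematic_bytes_spec : Claim_equal_fix_problematic_bytes := by
  intro bs _ hpre
  unfold Spec_fix_problematic_bytes fix_problematic_bytes fix_problematic_bytes_alt
  rw [foldl_append_singleton, List.nil_append, flatMap_decode_eq bs hpre]
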